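-- pv_equiv track=rewrite | github.com/ParkinsonLab/Architect | scripts/model_reconstruction/utils.py | convert_mapping_gene_name_to_compatible
-- ===== SOURCE A (Python) =====
-- def add_to_dict(key_value, key, value, need_values_in_set=True):
--
--     if not need_values_in_set:
--         key_value[key] = value
--     else:
--         if key not in key_value:
--             s = set()
--             s.add(value)
--             key_value[key] = s
--         else:
--             key_value[key].add(value)
--
-- def convert_mapping_gene_name_to_compatible(old_rxn_to_gene):
--
--     old_gene_names = set()
--     for genes in old_rxn_to_gene.values():
--         for gene in genes:
--             old_gene_names.add(gene)
--     old_to_new_gene_name = convert_gene_names_to_compatible(old_gene_names)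
--
--     new_rxn_to_gene = {}
--     for rxn, genes in old_rxn_to_gene.items():
--         for old_gene in genes:
--             new_gene = old_to_new_gene_name[old_gene]
--             add_to_dict(new_rxn_to_gene, rxn, new_gene)
--     return new_rxn_to_gene
--
-- def convert_gene_names_to_compatible(gene_names):
--
--     change_char_list = ["|", " ", "=", "+", "'", '"', "`"]
--     old_to_new_gene_name = {}
--     new_all_genes = set()
--     for old_gene_name in gene_names:
--         new_gene_name = ""
--         for ch in old_gene_name:
--             if not str.isalnum(ch):
--                 ch = "_"
--             new_gene_name = new_gene_name + ch
--         # new_gene_name = xml.sax.saxutils.escape(old_gene_name)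
--         # for curr_ch in change_char_list:
--         #     new_gene_name = replace_with_underscore(new_gene_name, curr_ch, new_all_genes)
--         new_all_genes.add(new_gene_name)
--         old_to_new_gene_name[old_gene_name] = "G_" + new_gene_name
--     return old_to_new_gene_name
-- ===== SOURCE B (Python) =====
-- def convert_mapping_gene_name_to_compatible(old_rxn_to_gene):
--     return {
--         rxn: {"G_" + "".join(c if c.isalnum() else "_" for c in gene) for gene in genes}
--         for rxn, genes in old_rxn_to_gene.items()
--         if genes
--     }
-- ===== Notes on version B (the rewrite author's own statement) =====
-- stated objective: simpler
-- what changed: Replaced A's two-phase design (collect every gene name into a global set, precompute an old-to-new sanitize table, then re-walk the dict inserting through an add_to_dict helper) with a single dict comprehension that builds each reaction's sanitized-name set directly in one pass.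
import Mathlib
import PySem

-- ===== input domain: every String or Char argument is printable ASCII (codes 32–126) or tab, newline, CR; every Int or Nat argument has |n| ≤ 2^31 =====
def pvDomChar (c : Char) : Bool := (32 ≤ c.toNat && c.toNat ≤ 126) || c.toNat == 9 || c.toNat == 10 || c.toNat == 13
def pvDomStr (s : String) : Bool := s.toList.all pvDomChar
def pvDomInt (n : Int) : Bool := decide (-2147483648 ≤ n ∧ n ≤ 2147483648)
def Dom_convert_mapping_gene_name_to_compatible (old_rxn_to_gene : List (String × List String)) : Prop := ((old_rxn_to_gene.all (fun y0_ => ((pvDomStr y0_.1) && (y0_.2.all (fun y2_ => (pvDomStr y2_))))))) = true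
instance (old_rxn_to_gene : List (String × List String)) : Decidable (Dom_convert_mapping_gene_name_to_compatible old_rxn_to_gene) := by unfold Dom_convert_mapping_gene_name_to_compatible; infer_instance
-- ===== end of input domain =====

-- B replaces A's two-phase design (global gene-name set + precomputed sanitize table + add_to_dict
-- re-walk) with a single dict comprehension building each reaction's sanitized-name set directly: simpler.


-- ===== PORT A =====
-- add_to_dict: only the need_values_in_set=True branch is transliterated (A always calls it with the default).
def add_to_dict (key_value : PySem.Dict String (PySem.Set String)) (key : String)
    (value : String) : PySem.Dict String (PySem.Set String) :=
  if ¬ (key_value.contains key = true) then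
    key_value.insert key (PySem.Set.add PySem.Set.empty value)
  else
    key_value.modify key PySem.Set.empty (fun s => PySem.Set.add s value)

-- the dict it returns is only looked up afterwards, so iterating the gene-name set is order-safe
def convert_gene_names_to_compatible (gene_names : List String) : PySem.Dict String String :=
  (gene_names.foldl
    (fun (st : PySem.Dict String String × PySem.Set String) old_gene_name =>
      let new_gene_name : List Char :=
        old_gene_name.toList.foldl
          (fun acc ch => acc ++ [if PySem.Chars.isalnum ch then ch else '_']) []
      (st.1.insert old_gene_name ("G_" ++ String.mk new_gene_name),
       PySem.Set.add st.2 (String.mk new_gene_name)))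
    (PySem.Dict.empty, PySem.Set.empty)).1

def convert_mapping_gene_name_to_compatible (old_rxn_to_gene : List (String × List String)) : List (String × List String) :=
  let d := PySem.Dict.ofList old_rxn_to_gene
  let old_gene_names : PySem.Set String :=
    d.values.foldl (fun s genes => genes.foldl (fun s gene => PySem.Set.add s gene) s)
      PySem.Set.empty
  let old_to_new_gene_name := convert_gene_names_to_compatible old_gene_names
  -- old_to_new_gene_name[old_gene] can never miss (every gene was collected), so getD "" is exact here
  let new_rxn_to_gene :=
    d.items.foldl
      (fun nd p =>
        p.2.foldl (fun nd old_gene => add_to_dict nd p.1 (old_to_new_gene_name.getD old_gene "")) nd)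
      PySem.Dict.empty
  new_rxn_to_gene.items

-- ===== PORT B =====
def convert_mapping_gene_name_to_compatible_alt (old_rxn_to_gene : List (String × List String)) : List (String × List String) :=
  ((PySem.Dict.ofList old_rxn_to_gene).items.filter (fun p => !p.2.isEmpty)).map
    (fun p => (p.1, PySem.Set.ofList (p.2.map (fun g =>
      "G_" ++ String.mk (g.toList.map (fun c => if PySem.Chars.isalnum c then c else '_'))))))

-- ===== PRECONDITION & SPEC =====
def Spec_convert_mapping_gene_name_to_compatible (old_rxn_to_gene : List (String × List String)) (out : List (String × List String)) : Prop := out = convert_mapping_gene_name_to_compatible_alt old_rxn_to_gene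
instance (old_rxn_to_gene : List (String × List String)) (out : List (String × List String)) : Decidable (Spec_convert_mapping_gene_name_to_compatible old_rxn_to_gene out) := by unfold Spec_convert_mapping_gene_name_to_compatible; infer_instance

-- ===== CLAIM (what is proved, stated in full; the proofs are below) =====
def Claim_equal_convert_mapping_gene_name_to_compatible : Prop := ∀ (old_rxn_to_gene : List (String × List String)), Dom_convert_mapping_gene_name_to_compatible old_rxn_to_gene → Spec_convert_mapping_gene_name_to_compatible old_rxn_to_gene (convert_mapping_gene_name_to_compatible old_rxn_to_gene)

-- ===== LEMMAS AND PROOFS =====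

-- the shared sanitize function
def pvF (g : String) : String :=
  "G_" ++ String.mk (g.toList.map (fun c => if PySem.Chars.isalnum c then c else '_'))

theorem pv_sanitize_fold (l : List Char) (acc : List Char) :
    l.foldl (fun acc ch => acc ++ [if PySem.Chars.isalnum ch then ch else '_']) acc
      = acc ++ l.map (fun c => if PySem.Chars.isalnum c then c else '_') := by
  induction l generalizing acc with
  | nil => simp
  | cons a l ih => simp [List.foldl_cons, ih]

theorem pv_table_get (l : List String) (st : PySem.Dict String String × PySem.Set String)
    (x : String) :
    ((l.foldl
      (fun (st : PySem.Dict String String × PySem.Set String) old_gene_name =>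
        (st.1.insert old_gene_name
          ("G_" ++ String.mk (old_gene_name.toList.map (fun c => if PySem.Chars.isalnum c then c else '_'))),
         PySem.Set.add st.2
          (String.mk (old_gene_name.toList.map (fun c => if PySem.Chars.isalnum c then c else '_'))))) st).1).get? x
      = if x ∈ l then some (pvF x) else st.1.get? x := by
  induction l generalizing st with
  | nil => simp
  | cons a l ih =>
    rw [List.foldl_cons, ih]
    by_cases hl : x ∈ l
    · simp [hl]
    · by_cases hxa : x = a
      · subst hxa
        simp [hl, PySem.Dict.get?_insert_self, pvF]
      · simp [hl, hxa, PySem.Dict.get?_insert_of_ne _ _ hxa]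

theorem pv_table_getD (gene_names : List String) (x : String) (hx : x ∈ gene_names) :
    (convert_gene_names_to_compatible gene_names).getD x "" = pvF x := by
  unfold convert_gene_names_to_compatible
  simp only [pv_sanitize_fold, List.nil_append, PySem.Dict.getD]
  rw [pv_table_get]
  simp [hx]

theorem pv_mem_inner_fold (genes : List String) (s : PySem.Set String) (x : String)
    (h : x ∈ s ∨ x ∈ genes) :
    x ∈ genes.foldl (fun s gene => PySem.Set.add s gene) s := by
  induction genes generalizing s with
  | nil => simpa using h
  | cons a l ih =>
    rw [List.foldl_cons]
    apply ih
    rcases h with h | h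
    · exact Or.inl ((PySem.Set.mem_add s a x).2 (Or.inl h))
    · rcases List.mem_cons.1 h with h | h
      · exact Or.inl ((PySem.Set.mem_add s a x).2 (Or.inr h))
      · exact Or.inr h
  
theorem pv_mem_collect (vals : List (List String)) (s : PySem.Set String) (x : String)
    (h : x ∈ s ∨ ∃ gs ∈ vals, x ∈ gs) :
    x ∈ vals.foldl (fun s genes => genes.foldl (fun s gene => PySem.Set.add s gene) s) s := by
  induction vals generalizing s with
  | nil =>
    rcases h with h | ⟨gs, hgs, _⟩
    · simpa using h
    · simp at hgs
  | cons a l ih =>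
    rw [List.foldl_cons]
    apply ih
    rcases h with h | ⟨gs, hgs, hx⟩
    · exact Or.inl (pv_mem_inner_fold a s x (Or.inl h))
    · rcases List.mem_cons.1 hgs with rfl | hgs
      · exact Or.inl (pv_mem_inner_fold gs s x (Or.inr hx))
      · exact Or.inr ⟨gs, hgs, hx⟩

theorem pv_find_last (base : List (String × PySem.Set String)) (rxn : String)
    (s : PySem.Set String) (h : rxn ∉ base.map (·.1)) :
    List.find? (fun p => p.1 == rxn) (base ++ [(rxn, s)]) = some (rxn, s) := by
  induction base with
  | nil => simp
  | cons a l ih =>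
    simp only [List.map_cons, List.mem_cons, not_or] at h
    rw [List.cons_append, List.find?_cons_of_neg, ih h.2]
    simp [Ne.symm h.1]

theorem pv_map_replace (base : List (String × PySem.Set String)) (rxn : String)
    (s w : PySem.Set String) (h : rxn ∉ base.map (·.1)) :
    (base ++ [(rxn, s)]).map (fun p => if p.1 == rxn then (rxn, w) else p)
      = base ++ [(rxn, w)] := by
  induction base with
  | nil => simp
  | cons a l ih =>
    simp only [List.map_cons, List.mem_cons, not_or] at h
    rw [List.cons_append, List.map_cons, ih h.2]
    simp [Ne.symm h.1]

theorem pv_contains_last (base : List (String × PySem.Set String)) (rxn : String)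
    (s : PySem.Set String) :
    (PySem.Dict.mk (base ++ [(rxn, s)])).contains rxn = true := by
  simp [PySem.Dict.contains]

theorem pv_inner_loop (gs : List String) (base : List (String × PySem.Set String))
    (rxn : String) (s : PySem.Set String) (v : String → String)
    (h : rxn ∉ base.map (·.1)) :
    gs.foldl (fun nd g => add_to_dict nd rxn (v g)) (PySem.Dict.mk (base ++ [(rxn, s)]))
      = PySem.Dict.mk (base ++ [(rxn, gs.foldl (fun s g => PySem.Set.add s (v g)) s)]) := by
  induction gs generalizing s with
  | nil => simp
  | cons g gs ih =>
    rw [List.foldl_cons]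
    have hstep : add_to_dict (PySem.Dict.mk (base ++ [(rxn, s)])) rxn (v g)
        = PySem.Dict.mk (base ++ [(rxn, PySem.Set.add s (v g))]) := by
      rw [add_to_dict]
      rw [if_neg (by simp)]
      unfold PySem.Dict.modify PySem.Dict.getD PySem.Dict.get? PySem.Dict.insert
      rw [pv_find_last base rxn s h]
      rw [if_pos (pv_contains_last base rxn _)]
      simp only [Option.map_some, Option.getD_some]
      rw [pv_map_replace base rxn s _ h]
    rw [hstep, ih]
    simp

theorem pv_contains_mk_false (base : List (String × PySem.Set String)) (rxn : String)
    (h : rxn ∉ base.map (·.1)) :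
    (PySem.Dict.mk base).contains rxn = false := by
  simp only [PySem.Dict.contains, List.any_eq_false]
  intro p hp hbe
  exact h (List.mem_map.2 ⟨p, hp, by simpa using hbe⟩)

theorem pv_ofList_map_eq_foldl (l : List String) (v : String → String) :
    PySem.Set.ofList (l.map v) = l.foldl (fun s g => PySem.Set.add s (v g)) PySem.Set.empty := by
  rw [← PySem.Set.update_map_eq_foldl_add]
  exact (PySem.Set.update_nil_left (l.map v)).symm

theorem pv_outer_loop (items : List (String × List String))
    (base : List (String × PySem.Set String)) (v : String → String)
    (hnd : (items.map (·.1)).Nodup) (hdis : ∀ p ∈ items, p.1 ∉ base.map (·.1)) :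
    (items.foldl
        (fun nd p => p.2.foldl (fun nd g => add_to_dict nd p.1 (v g)) nd)
        (PySem.Dict.mk base)).items
      = base ++ (items.filter (fun p => !p.2.isEmpty)).map
          (fun p => (p.1, PySem.Set.ofList (p.2.map v))) := by
  induction items generalizing base with
  | nil => simp
  | cons p rest ih =>
    obtain ⟨rxn, genes⟩ := p
    simp only [List.map_cons, List.nodup_cons] at hnd
    have hb : rxn ∉ base.map (·.1) := hdis (rxn, genes) (List.mem_cons_self ..)
    rw [List.foldl_cons]
    cases genes with
    | nil =>
      simp only [List.foldl_nil]
      rw [ih base hnd.2 (fun q hq => hdis q (List.mem_cons_of_mem _ hq))]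
      simp
    | cons g gs =>
      have h1 : add_to_dict (PySem.Dict.mk base) rxn (v g)
          = PySem.Dict.mk (base ++ [(rxn, PySem.Set.add PySem.Set.empty (v g))]) := by
        rw [add_to_dict, if_pos (by simp [pv_contains_mk_false base rxn hb])]
        unfold PySem.Dict.insert
        rw [if_neg (by simp [pv_contains_mk_false base rxn hb])]
      rw [List.foldl_cons, h1, pv_inner_loop gs base rxn _ v hb]
      rw [ih _ hnd.2 ?_]
      · have hset : PySem.Set.ofList ((g :: gs).map v)
            = gs.foldl (fun s g => PySem.Set.add s (v g)) [v g] := by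
          rw [pv_ofList_map_eq_foldl]
          simp [PySem.Set.add, PySem.Set.empty, PySem.Set.contains]
        simp only [List.map_cons] at hset
        simp [← hset]
      · intro q hq
        simp only [List.map_append, List.map_cons, List.map_nil, List.mem_append,
          List.mem_singleton, not_or]
        refine ⟨hdis q (List.mem_cons_of_mem _ hq), ?_⟩
        intro hq1
        exact hnd.1 (hq1 ▸ List.mem_map.2 ⟨q, hq, rfl⟩)

theorem pv_nodup_keys_ofList (l : List (String × List String)) :
    ((PySem.Dict.ofList l).items.map (·.1)).Nodup := by
  have h := PySem.Dict.keys_foldl_insert_key (κ := String) (ν := List String)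
    l (fun p => p.1) (fun _ p => p.2) PySem.Dict.empty
  have h2 : (PySem.Dict.ofList l).keys = PySem.Set.ofList (l.map (·.1)) := by
    unfold PySem.Dict.ofList PySem.Dict.update
    rw [show (fun (acc : PySem.Dict String (List String)) (p : String × List String) =>
          acc.insert p.1 p.2)
        = (fun (d : PySem.Dict String (List String)) (x : String × List String) =>
          d.insert ((fun p => p.1) x) ((fun _ p => p.2) d x)) from rfl, h]
    simp [PySem.Set.update_nil_left, PySem.Dict.empty]
  have : (PySem.Dict.ofList l).keys = (PySem.Dict.ofList l).items.map (·.1) := rfl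
  rw [← this, h2]
  exact PySem.Set.nodup_ofList _

-- ===== VERDICT (by name: the statement is the Claim_ definition above) =====
theorem convert_mapping_gene_name_to_compatible_spec : Claim_equal_convert_mapping_gene_name_to_compatible := by
  intro l _
  unfold Spec_convert_mapping_gene_name_to_compatible
  unfold convert_mapping_gene_name_to_compatible convert_mapping_gene_name_to_compatible_alt
  simp only []
  -- replace the table lookup by pvF on every gene that actually occurs
  rw [PySem.List.foldl_congr_mem _ _
    (fun nd p => p.2.foldl (fun nd g => add_to_dict nd p.1 (pvF g)) nd) _ ?_]
  · have hbase : PySem.Dict.empty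
        = PySem.Dict.mk ([] : List (String × PySem.Set String)) := rfl
    rw [hbase, pv_outer_loop _ [] pvF (pv_nodup_keys_ofList l) (by simp)]
    simp only [List.nil_append]
    rfl
  · intro nd p hp
    apply PySem.List.foldl_congr_mem
    intro acc g hg
    have hmem : g ∈ (PySem.Dict.ofList l).values.foldl
        (fun s genes => genes.foldl (fun s gene => PySem.Set.add s gene) s) PySem.Set.empty := by
      apply pv_mem_collect
      exact Or.inr ⟨p.2, List.mem_map.2 ⟨p, hp, rfl⟩, hg⟩
    rw [pv_table_getD _ g hmem]
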